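-- pv_equiv track=rewrite | github.com/cinvymoe/qt4rust | scripts/fix_all_translations.py | has_locale_version
-- ===== SOURCE A (Python) =====
-- from typing import List, Tuple
--
-- def has_locale_version(lines: List[str], start_line: int) -> bool:
--     """检查组件是否已经有 _localeVersion 属性"""
--     brace_count = 0
--     for i in range(start_line, min(start_line + 50, len(lines))):
--         line = lines[i]
--         if '_localeVersion' in line:
--             return True
--         brace_count += line.count('{') - line.count('}')
--         if brace_count <= 0 and i > start_line:
--             break
--     return False
-- ===== SOURCE B (Python) =====
-- def has_locale_version(lines, start_line):
--     """检查组件是否已经有 _localeVersion 属性"""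
--     # Pass 1: materialize the candidate window.
--     hi = min(start_line + 50, len(lines))
--     block = [lines[i] for i in range(start_line, hi)]
--     # Pass 2: how many lines belong to the block (up to and incl. the closing line)?
--     k = len(block)
--     total = 0
--     for j, line in enumerate(block):
--         total += line.count('{') - line.count('}')
--         if total <= 0 and j > 0:
--             k = j + 1
--             break
--     # Pass 3: search the block.
--     return any('_localeVersion' in line for line in block[:k])
-- ===== Notes on version B (the rewrite author's own statement) =====
-- stated objective: alternative
-- what changed: Replaces A's single fused early-exit loop by three separate passes: materialize the 50-line window, compute the block length k by brace counting alone, then search the first k lines with any(); same O(n) cost.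
import Mathlib
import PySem

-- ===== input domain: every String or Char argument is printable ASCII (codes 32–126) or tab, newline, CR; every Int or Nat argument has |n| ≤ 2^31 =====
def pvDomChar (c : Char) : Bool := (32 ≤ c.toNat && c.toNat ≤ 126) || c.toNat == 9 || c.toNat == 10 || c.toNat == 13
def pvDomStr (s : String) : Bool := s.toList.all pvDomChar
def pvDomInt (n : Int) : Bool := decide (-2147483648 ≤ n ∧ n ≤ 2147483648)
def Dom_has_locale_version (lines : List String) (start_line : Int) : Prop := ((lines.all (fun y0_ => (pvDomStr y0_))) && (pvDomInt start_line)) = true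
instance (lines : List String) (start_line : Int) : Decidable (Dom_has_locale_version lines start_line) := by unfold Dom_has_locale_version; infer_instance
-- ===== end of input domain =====

-- B splits A's fused early-exit loop into three passes (materialize window, compute block length, search prefix); same cost, no speed claim.

-- ===== PORT A =====
-- A's fused loop; lines[i] is in range under Pre_, so pyGetD … "" is exact there.
def hlvA_go (lines : List String) (start_line : Int) : List Int → Int → Bool
  | [], _ => false
  | i :: rest, brace_count =>
    let line := PySem.List.pyGetD lines i ""
    if PySem.Str.isIn "_localeVersion" line then true
    else
      let brace' := brace_count + ((PySem.Str.count line "{" : Int) - (PySem.Str.count line "}" : Int))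
      if brace' ≤ 0 ∧ i > start_line then false
      else hlvA_go lines start_line rest brace'

def has_locale_version (lines : List String) (start_line : Int) : Bool :=
  hlvA_go lines start_line
    (PySem.List.pyRange start_line (min (start_line + 50) (lines.length : Int)) 1) 0

-- ===== PORT B =====
-- Source B's pass 2: the enumerate loop computing the block length k (default = len(block)).
def hlvB_k : List String → Int → Int → Int → Int
  | [], _, _, k => k
  | line :: rest, j, total, k =>
    let total' := total + ((PySem.Str.count line "{" : Int) - (PySem.Str.count line "}" : Int))
    if total' ≤ 0 ∧ j > 0 then j + 1
    else hlvB_k rest (j + 1) total' k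

def has_locale_version_alt (lines : List String) (start_line : Int) : Bool :=
  let hi := min (start_line + 50) (lines.length : Int)
  -- pass 1: block = [lines[i] for i in range(start_line, hi)]; in range under Pre_, so pyGetD … "" is exact there
  let block := (PySem.List.pyRange start_line hi 1).map (fun i => PySem.List.pyGetD lines i "")
  let k := hlvB_k block 0 0 (block.length : Int)
  -- pass 3: any('_localeVersion' in line for line in block[:k])
  (PySem.List.slice block none (some k)).any (fun line => PySem.Str.isIn "_localeVersion" line)

-- ===== PRECONDITION & SPEC =====
-- Pre_ excludes exactly the inputs where Python A raises IndexError (negative index past the front).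
def Pre_has_locale_version (lines : List String) (start_line : Int) : Prop :=
  -(lines.length : Int) ≤ start_line
instance (lines : List String) (start_line : Int) : Decidable (Pre_has_locale_version lines start_line) := by unfold Pre_has_locale_version; infer_instance

def pvWitness_has_locale_version : List String × Int := (["Item {", "  x: 1", "}"], 0)

def Spec_has_locale_version (lines : List String) (start_line : Int) (out : Bool) : Prop := out = has_locale_version_alt lines start_line
instance (lines : List String) (start_line : Int) (out : Bool) : Decidable (Spec_has_locale_version lines start_line out) := by unfold Spec_has_locale_version; infer_instance

-- ===== CLAIM (what is proved, stated in full; the proofs are below) =====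
def Claim_equal_has_locale_version : Prop := ∀ (lines : List String) (start_line : Int), Dom_has_locale_version lines start_line → Pre_has_locale_version lines start_line → Spec_has_locale_version lines start_line (has_locale_version lines start_line)

-- ===== LEMMAS AND PROOFS =====

-- proof-side abbreviations
def pvC (l : String) : Bool := PySem.Str.isIn "_localeVersion" l
def pvD (l : String) : Int := (PySem.Str.count l "{" : Int) - (PySem.Str.count l "}" : Int)

theorem pvC_def (l : String) : PySem.Str.isIn "_localeVersion" l = pvC l := rfl
theorem pvD_def (l : String) : ((PySem.Str.count l "{" : Int) - (PySem.Str.count l "}" : Int)) = pvD l := rfl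

-- A's loop once past the first line (there i > start_line always holds)
def pvAtail : List String → Int → Bool
  | [], _ => false
  | l :: rest, b =>
    if pvC l then true
    else
      if b + pvD l ≤ 0 then false else pvAtail rest (b + pvD l)

-- relative break position of B's pass 2 on the tail (1-based count of consumed lines; none = no break)
def pvBk : List String → Int → Option Nat
  | [], _ => none
  | l :: rest, b =>
    if b + pvD l ≤ 0 then some 1 else (pvBk rest (b + pvD l)).map (· + 1)

theorem hlvA_go_tail (lines : List String) (s : Int) :
    ∀ (idxs : List Int), (∀ i ∈ idxs, s < i) → ∀ b,
      hlvA_go lines s idxs b = pvAtail (idxs.map (fun i => PySem.List.pyGetD lines i "")) b := by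
  intro idxs
  induction idxs with
  | nil => intro _ b; rfl
  | cons i rest ih =>
    intro h b
    have hgt : i > s := h i (List.mem_cons_self)
    have hrest : ∀ j ∈ rest, s < j := fun j hj => h j (List.mem_cons_of_mem _ hj)
    simp only [List.map_cons, hlvA_go, pvAtail, pvC_def, pvD_def]
    by_cases hc : pvC (PySem.List.pyGetD lines i "")
    · rw [if_pos hc, if_pos hc]
    · rw [if_neg hc, if_neg hc]
      by_cases hb : b + pvD (PySem.List.pyGetD lines i "") ≤ 0
      · rw [if_pos ⟨hb, hgt⟩, if_pos hb]
      · rw [if_neg (fun hx => hb hx.1), if_neg hb, ih hrest]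

theorem hlvB_k_tail : ∀ (xs : List String) (j b k0 : Int), 0 < j →
    hlvB_k xs j b k0 = (pvBk xs b).elim k0 (fun m => j + (m : Int)) := by
  intro xs
  induction xs with
  | nil => intro j b k0 _; rfl
  | cons l rest ih =>
    intro j b k0 hj
    simp only [hlvB_k, pvBk, pvD_def]
    by_cases hb : b + pvD l ≤ 0
    · rw [if_pos ⟨hb, hj⟩, if_pos hb]
      simp [Option.elim]
    · rw [if_neg (fun hx => hb hx.1), if_neg hb, ih _ _ _ (by omega)]
      cases pvBk rest (b + pvD l) with
      | none => simp [Option.elim]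
      | some m => simp [Option.elim]; ring

theorem pvAtail_eq_take_any : ∀ (xs : List String) (b : Int),
    pvAtail xs b = (xs.take ((pvBk xs b).getD xs.length)).any pvC := by
  intro xs
  induction xs with
  | nil => intro b; rfl
  | cons l rest ih =>
    intro b
    simp only [pvAtail, pvBk]
    by_cases hc : pvC l
    · rw [if_pos hc]
      by_cases hb : b + pvD l ≤ 0
      · simp [hb, hc]
      · cases hk : pvBk rest (b + pvD l) <;> simp [hb, hc]
    · rw [if_neg hc]
      by_cases hb : b + pvD l ≤ 0
      · rw [if_pos hb]
        simp [hb, hc]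
      · rw [if_neg hb, ih]
        cases hk : pvBk rest (b + pvD l) <;> simp [hb, hc]

-- ===== VERDICT (by name: the statement is the Claim_ definition above) =====
theorem has_locale_version_spec : Claim_equal_has_locale_version := by
  intro lines s _ _
  unfold Spec_has_locale_version
  simp only [has_locale_version, has_locale_version_alt, pvC_def]
  set hi := min (s + 50) (lines.length : Int) with hhi
  by_cases h : hi ≤ s
  · rw [PySem.List.pyRange_one_eq_nil h]
    simp [hlvA_go, hlvB_k, PySem.List.slice]
  · rw [not_le] at h
    rw [PySem.List.pyRange_one_cons h]
    simp only [List.map_cons]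
    set hd := PySem.List.pyGetD lines s "" with hhd
    set tl := (PySem.List.pyRange (s + 1) hi 1).map (fun i => PySem.List.pyGetD lines i "") with htl
    have hA : hlvA_go lines s (s :: PySem.List.pyRange (s + 1) hi 1) 0
        = (if pvC hd then true else pvAtail tl (pvD hd)) := by
      simp only [hlvA_go, pvC_def, pvD_def, zero_add, ← hhd]
      by_cases hc : pvC hd
      · rw [if_pos hc, if_pos hc]
      · rw [if_neg hc, if_neg hc,
          if_neg (fun hx => lt_irrefl s hx.2),
          hlvA_go_tail lines s _ (fun i hii => (PySem.List.mem_pyRange_one.mp hii).1) (pvD hd), ← htl]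
    have hstep : hlvB_k (hd :: tl) 0 0 (((hd :: tl).length : Nat) : Int)
        = (pvBk tl (pvD hd)).elim ((tl.length : Int) + 1) (fun m => 1 + (m : Int)) := by
      simp only [hlvB_k, pvD_def, zero_add]
      rw [if_neg (fun hx => lt_irrefl (0 : Int) hx.2), hlvB_k_tail tl 1 _ _ one_pos]
      simp only [List.length_cons]
      push_cast
      ring_nf
    rw [hA, hstep]
    cases hk : pvBk tl (pvD hd) with
    | none =>
      rw [Option.elim, PySem.List.slice_to _ (by positivity)]
      have hn : ((tl.length : Int) + 1).toNat = tl.length + 1 := by omega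
      rw [hn, List.take_succ_cons, List.take_length, pvAtail_eq_take_any, hk]
      simp only [Option.getD_none, List.take_length, List.any_cons]
      by_cases hc : pvC hd <;> simp [hc]
    | some m =>
      rw [Option.elim, PySem.List.slice_to _ (by positivity)]
      have hn : ((1 : Int) + (m : Int)).toNat = m + 1 := by omega
      rw [hn, List.take_succ_cons, pvAtail_eq_take_any, hk]
      simp only [Option.getD_some, List.any_cons]
      by_cases hc : pvC hd <;> simp [hc]
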